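-- pv_equiv track=rewrite | github.com/AlamDiego77/Atividades_Linguagens_Formais_e_Automatos | Atividas-Espressões-Regulares-Aula6/Exercicio6.py | afd_par_de_a
-- ===== SOURCE A (Python) =====
-- def afd_par_de_a(cadeia: str) -> bool:
--     """
--     AFD que reconhece cadeias com número par de 'a'.
--     Estado inicial: q0
--     Estado de aceitação: q0 (número par de 'a')
--     """
--     estado = 'q0'  # estado inicial
--
--     for simbolo in cadeia:
--         if estado == 'q0':
--             if simbolo == 'a':
--                 estado = 'q1'
--             elif simbolo == 'b':
--                 estado = 'q0'  # permanece
--             else: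
--                 return False  # símbolo inválido
--         elif estado == 'q1':
--             if simbolo == 'a':
--                 estado = 'q0'
--             elif simbolo == 'b':
--                 estado = 'q1'  # permanece
--             else:
--                 return False  # símbolo inválido
--
--     # aceita se terminar no estado q0
--     return estado == 'q0'
-- ===== SOURCE B (Python) =====
-- def afd_par_de_a(cadeia: str) -> bool:
--     # Simpler: validate the alphabet, then a closed-form parity check.
--     if not all(c in 'ab' for c in cadeia):
--         return False
--     return cadeia.count('a') % 2 == 0
-- ===== Notes on version B (the rewrite author's own statement) =====
-- stated objective: simpler
-- what changed: Replaced the explicit two-state DFA scan with a whole-string alphabet validation pass followed by a closed-form parity check on the occurrence count of the first alphabet letter.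
import Mathlib
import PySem

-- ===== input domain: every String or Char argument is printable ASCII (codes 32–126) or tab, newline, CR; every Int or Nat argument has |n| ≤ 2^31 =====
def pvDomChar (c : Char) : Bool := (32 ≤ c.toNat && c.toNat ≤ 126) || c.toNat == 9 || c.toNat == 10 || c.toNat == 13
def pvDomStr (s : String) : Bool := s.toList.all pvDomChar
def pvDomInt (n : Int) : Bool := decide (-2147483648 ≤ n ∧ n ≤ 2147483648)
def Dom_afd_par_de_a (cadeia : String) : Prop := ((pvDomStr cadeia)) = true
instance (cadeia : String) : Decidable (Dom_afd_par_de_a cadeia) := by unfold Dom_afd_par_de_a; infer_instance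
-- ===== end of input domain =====

-- B replaces A's two-state DFA scan with an alphabet-validation pass plus a closed-form parity check (objective: simpler).

-- ===== PORT A =====
-- A's for-loop over the string with mutable 'estado' and early 'return False'
def afdLoop : List Char → String → Bool
  | [], estado => estado == "q0"
  | simbolo :: rest, estado =>
    if estado == "q0" then
      if simbolo == 'a' then afdLoop rest "q1"
      else if simbolo == 'b' then afdLoop rest "q0"
      else false
    else if estado == "q1" then
      if simbolo == 'a' then afdLoop rest "q0"
      else if simbolo == 'b' then afdLoop rest "q1"
      else false
    else afdLoop rest estado

def afd_par_de_a (cadeia : String) : Bool := afdLoop cadeia.toList "q0"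

-- ===== PORT B =====
def afd_par_de_a_alt (cadeia : String) : Bool :=
  if ¬ (cadeia.toList.all (fun c => c == 'a' || c == 'b')) then false
  else PySem.List.count cadeia.toList 'a' % 2 == 0

-- ===== PRECONDITION & SPEC =====
def Spec_afd_par_de_a (cadeia : String) (out : Bool) : Prop := out = afd_par_de_a_alt cadeia
instance (cadeia : String) (out : Bool) : Decidable (Spec_afd_par_de_a cadeia out) := by unfold Spec_afd_par_de_a; infer_instance

-- ===== CLAIM (what is proved, stated in full; the proofs are below) =====
def Claim_equal_afd_par_de_a : Prop := ∀ (cadeia : String), Dom_afd_par_de_a cadeia → Spec_afd_par_de_a cadeia (afd_par_de_a cadeia)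

-- ===== LEMMAS AND PROOFS =====

theorem afdLoop_char (l : List Char) :
    (afdLoop l "q0" = (if l.all (fun c => c == 'a' || c == 'b')
        then (l.count 'a' % 2 == 0) else false))
    ∧ (afdLoop l "q1" = (if l.all (fun c => c == 'a' || c == 'b')
        then (l.count 'a' % 2 == 1) else false)) := by
  induction l with
  | nil => simp [afdLoop]
  | cons c rest ih =>
    obtain ⟨ih0, ih1⟩ := ih
    by_cases ha : c = 'a'
    · subst ha
      constructor
      · simp [afdLoop, ih1]
        cases hd : decide (∀ x ∈ rest, x = 'a' ∨ x = 'b') <;> simp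
        omega
      · simp [afdLoop, ih0]
        cases hd : decide (∀ x ∈ rest, x = 'a' ∨ x = 'b') <;> simp
        omega
    · by_cases hb : c = 'b'
      · subst hb
        constructor
        · simp [afdLoop, ih0]
        · simp [afdLoop, ih1]
      · constructor <;> simp [afdLoop, ha, hb]

-- ===== VERDICT (by name: the statement is the Claim_ definition above) =====
theorem afd_par_de_a_spec : Claim_equal_afd_par_de_a := by
  intro cadeia _
  unfold Spec_afd_par_de_a afd_par_de_a afd_par_de_a_alt
  rw [(afdLoop_char cadeia.toList).1]
  by_cases hv : cadeia.toList.all (fun c => c == 'a' || c == 'b') = true <;>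
    simp [hv, PySem.List.count_eq]
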